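/- GENERATED by tools/from_farm_form.py from prooffarm-gif/accepted/DGifOpen.2/Proof.lean (a worked proof of the farm's unit `DGifOpen.2`,
   accepted by the verdict) — do not edit. -/
import Gif.Spec.Units.DGifOpen_2
import Gif.Spec.AllSegs
import Gif.Spec.Proved.DGifOpen_2_Lemmas

open X86 X86.User Asan ProgX.Base ProgX.Base.Spec Gif.Spec

/-!
  `DGifOpen.2` (0x10871a … 0x10879e and 0x10884b … 0x10886d, 37 instructions; dgif_lib.c:186-202): `calloc` of the private object,
  `memset`, THE SIX CHECKED STORES that make the reader; on NULL `*Error`, `free(GifFile)`, to the epilogue. The returns of the three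
  calls are not cuts of the design, so the unit makes them cuts of its own (Lemmas.lean: `o2_Null`, `o2_Got`, `o2_Freed`) and chains
  five walks here:

      10871a ── calloc ── ret5 ─┬─ NULL ── [*Error] ── free(gif) ── ret20 ── 108816   (`Exit`, the heap `Hc.release gif`)
                                └─ pv ──── memset ── ret6 ── six stores ── 10879e      (`Opened`, the heap `Hc.push 24936 (r16 24936)`)
-/

/-- Segment 2 of `DGifOpen` takes `AfterGif` at 0x10871a to `Opened` at 0x10879e or to an exit at 0x108816. -/
theorem Gif.Spec.Proved.DGifOpen_2_ok : Gif.Spec.DGifOpen_2.Statement := by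
  intro Lay hLay μ hμ u₀ hcode h_calloc h_memset h_free h_store8 h_store4 H rest frames R Hc gif e ret v hat
  -- the callees' contracts at the heaps and the frame list of the body (the own frame in front)
  have hcal := h_calloc Hc rest (DGifOpen.framesIn frames e)
  have hfre := h_free Hc rest (DGifOpen.framesIn frames e) 120
  have hset := h_memset ((Hc.push 24936 (r16 24936)).liveObjs ++ rest) (DGifOpen.framesIn frames e)
  -- 0x10871a … calloc … 0x108729 (ret5)
  refine (Gif.Spec.DGifOpen_2.o2_seg_calloc Lay hLay μ hμ u₀ hcode H rest frames R Hc gif e ret hcal v hat).trans ?_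
  intro v1 hv1
  rcases hv1 with hnull | hgot
  · -- NULL: 0x108729 … 0x10884b … free … 0x108868 (ret20)
    refine (Gif.Spec.DGifOpen_2.o2_seg_null Lay hLay μ hμ u₀ hcode H rest frames R Hc gif e ret hfre h_store4 v1 hnull).trans ?_
    intro v2 hv2
    -- 0x108868 … 0x108816
    refine (Gif.Spec.DGifOpen_2.o2_seg_exit Lay hLay μ hμ u₀ hcode H rest frames R (Hc.release gif) e ret v2 hv2).mono ?_
    intro w hw
    exact Or.inr hw
  · -- the private object: 0x108729 … memset … 0x108747 (ret6)
    refine (Gif.Spec.DGifOpen_2.o2_seg_memset Lay hLay μ hμ u₀ hcode H rest frames R (Hc.push 24936 (r16 24936)) gif Hc.next e ret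
      hset v1 hgot).trans ?_
    intro v2 hv2
    -- 0x108747 … the six stores … 0x10879e
    refine (Gif.Spec.DGifOpen_2.o2_seg_stores Lay hLay μ hμ u₀ hcode H rest frames R (Hc.push 24936 (r16 24936)) gif Hc.next e ret
      h_store8 h_store4 v2 hv2).mono ?_
    intro w hw
    exact Or.inl ⟨_, _, hw⟩
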